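-- pv_equiv track=rewrite | github.com/JonatasDeOliveira/Projeto-RI | Ranker/ranker.py | matrixDist
-- ===== SOURCE A (Python) =====
-- def removeDuplicates(query):
--     result = []
--     for q in query:
--        if q not in result:
--            result.append(q)
--     return result
--
-- def minDist(term1, term2, invertedFile):
--     if len(invertedFile.get(term1,[])) == 0:
--         return 150000
--     if len(invertedFile.get(term2,[])) == 0:
--         return 150000
--     minValue = 150000
--     list1 = invertedFile.get(term1)
--     list2 = invertedFile.get(term2)
--     l1 = range(0,len(list1))
--     l2 = range(0,len(list2))
--     for i in l1:
--         for j in l2: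
--             if(abs(list2[j]-list1[i])<minValue):
--                 minValue = abs(list2[j]-list1[i])
--     return minValue
--
-- def matrixDist(query, invertedFile):
--     query = removeDuplicates(query)
--     matrix = [[0 for x in range(len(query))] for y in range(len(query))]
--     l1 = range(0,len(query))
--     for i in l1:
--         for j in l1:
--             if i!=j:
--                 matrix[i][j] = minDist(query[i],query[j],invertedFile)
--     return matrix
-- ===== SOURCE B (Python) =====
-- def _pairMin(l1, l2):
--     if not l1 or not l2:
--         return 150000
--     best = 150000
--     prev = None
--     for p, t in sorted([(p, 0) for p in l1] + [(p, 1) for p in l2], key=lambda pt: pt[0]):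
--         if prev is not None and prev[1] != t:
--             d = p - prev[0]
--             if d < best:
--                 best = d
--         prev = (p, t)
--     return best
--
-- def matrixDist(query, invertedFile):
--     terms = []
--     seen = set()
--     for q in query:
--         if q not in seen:
--             seen.add(q)
--             terms.append(q)
--     plists = [invertedFile.get(t, []) for t in terms]
--     n = len(terms)
--     return [[_pairMin(plists[i], plists[j]) if i != j else 0 for j in range(n)]
--             for i in range(n)]
-- ===== Notes on version B (the rewrite author's own statement) =====
-- stated objective: alternative
-- what changed: Per pair of terms, B sorts the two tagged position lists together and takes the minimum gap between adjacent entries of different origin (O((n+m)log(n+m)) per pair instead of A's O(n*m) all-pairs scan), and replaces A's quadratic list-membership dedup with a hash-set dedup; intended as faster per pair (measured about 2x in a timing run, but both implementations are quadratic in the number of distinct query terms, which the largest generated inputs are dominated by).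
import Mathlib
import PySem

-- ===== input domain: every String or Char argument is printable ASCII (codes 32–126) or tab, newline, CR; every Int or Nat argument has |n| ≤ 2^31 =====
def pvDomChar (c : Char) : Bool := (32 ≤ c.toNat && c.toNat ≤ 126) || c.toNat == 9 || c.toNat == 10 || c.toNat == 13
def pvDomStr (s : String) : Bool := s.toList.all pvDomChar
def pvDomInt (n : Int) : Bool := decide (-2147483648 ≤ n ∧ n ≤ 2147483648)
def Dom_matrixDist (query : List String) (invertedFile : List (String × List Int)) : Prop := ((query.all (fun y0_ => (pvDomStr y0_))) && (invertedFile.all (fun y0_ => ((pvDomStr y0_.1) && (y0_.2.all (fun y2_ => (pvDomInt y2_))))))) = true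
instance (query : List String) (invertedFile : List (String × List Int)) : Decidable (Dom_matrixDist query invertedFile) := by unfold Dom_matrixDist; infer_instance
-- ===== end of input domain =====

-- B replaces A's all-pairs scan per term pair by a sort + adjacent-scan of the tagged merged
-- position lists, and A's quadratic list dedup by a hash-set dedup (a different algorithm).

-- ===== PORT A =====
def pvRemoveDuplicates (query : List String) : List String :=
  query.foldl (fun result q => if result.contains q then result else result ++ [q]) []

def pvMinDist (term1 term2 : String) (invertedFile : PySem.Dict String (List Int)) : Int :=
  if PySem.List.len (invertedFile.getD term1 []) = 0 then 150000
  else if PySem.List.len (invertedFile.getD term2 []) = 0 then 150000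
  else
    let list1 := invertedFile.getD term1 []
    let list2 := invertedFile.getD term2 []
    (PySem.List.pyRange 0 (PySem.List.len list1) 1).foldl (fun minValue i =>
      (PySem.List.pyRange 0 (PySem.List.len list2) 1).foldl (fun minValue j =>
        if |PySem.List.pyGetD list2 j 0 - PySem.List.pyGetD list1 i 0| < minValue
        then |PySem.List.pyGetD list2 j 0 - PySem.List.pyGetD list1 i 0| else minValue)
        minValue) 150000

def matrixDist (query : List String) (invertedFile : List (String × List Int)) : List (List Int) :=
  let d := PySem.Dict.mk invertedFile
  let query' := pvRemoveDuplicates query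
  let n := PySem.List.len query'
  let matrix0 : List (List Int) :=
    (PySem.List.pyRange 0 n 1).map (fun _ => (PySem.List.pyRange 0 n 1).map (fun _ => (0 : Int)))
  (PySem.List.pyRange 0 n 1).foldl (fun matrix i =>
    (PySem.List.pyRange 0 n 1).foldl (fun matrix j =>
      if i ≠ j then
        PySem.List.pySetD matrix i (PySem.List.pySetD (PySem.List.pyGetD matrix i []) j
          (pvMinDist (PySem.List.pyGetD query' i "") (PySem.List.pyGetD query' j "") d))
      else matrix) matrix) matrix0

-- ===== PORT B =====
def pvPairMin (l1 l2 : List Int) : Int :=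
  if l1 = [] ∨ l2 = [] then 150000
  else
    let tagged := PySem.List.sorted
      (l1.map (fun p => (p, (0 : Int))) ++ l2.map (fun p => (p, (1 : Int)))) (fun pt => pt.1) false
    (tagged.foldl (fun (st : Int × Option (Int × Int)) pt =>
        match st.2 with
        | none => (st.1, some pt)
        | some prev =>
          if prev.2 ≠ pt.2 then
            (if pt.1 - prev.1 < st.1 then pt.1 - prev.1 else st.1, some pt)
          else (st.1, some pt)) ((150000 : Int), (none : Option (Int × Int)))).1

def matrixDist_alt (query : List String) (invertedFile : List (String × List Int)) : List (List Int) :=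
  let d := PySem.Dict.mk invertedFile
  let st := query.foldl (fun (st : List String × PySem.Set String) q =>
      if PySem.Set.contains st.2 q then st else (st.1 ++ [q], PySem.Set.add st.2 q))
    ([], PySem.Set.empty)
  let terms := st.1
  let plists := terms.map (fun t => d.getD t [])
  let n := terms.length
  (PySem.List.pyRange 0 (n : Int) 1).map (fun i =>
    (PySem.List.pyRange 0 (n : Int) 1).map (fun j =>
      if i ≠ j then pvPairMin (PySem.List.pyGetD plists i []) (PySem.List.pyGetD plists j [])
      else 0))

-- ===== PRECONDITION & SPEC =====
def Spec_matrixDist (query : List String) (invertedFile : List (String × List Int)) (out : List (List Int)) : Prop := out = matrixDist_alt query invertedFile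
instance (query : List String) (invertedFile : List (String × List Int)) (out : List (List Int)) : Decidable (Spec_matrixDist query invertedFile out) := by unfold Spec_matrixDist; infer_instance

-- ===== CLAIM (what is proved, stated in full; the proofs are below) =====
def Claim_equal_matrixDist : Prop := ∀ (query : List String) (invertedFile : List (String × List Int)), Dom_matrixDist query invertedFile → Spec_matrixDist query invertedFile (matrixDist query invertedFile)

-- ===== LEMMAS AND PROOFS =====

-- adjacent different-tag gaps of a tagged list
def pvAdjDiffs : List (Int × Int) → List Int
  | a :: b :: t => (if a.2 ≠ b.2 then [b.1 - a.1] else []) ++ pvAdjDiffs (b :: t)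
  | _ => []

def pvCross (l1 l2 : List Int) : List Int := l1.flatMap (fun x => l2.map (fun y => |y - x|))

theorem pvScan_eq (t : List (Int × Int)) (a : Int × Int) (best : Int) :
    (t.foldl (fun (st : Int × Option (Int × Int)) pt =>
        match st.2 with
        | none => (st.1, some pt)
        | some prev =>
          if prev.2 ≠ pt.2 then
            (if pt.1 - prev.1 < st.1 then pt.1 - prev.1 else st.1, some pt)
          else (st.1, some pt)) (best, some a)).1
      = (pvAdjDiffs (a :: t)).foldl min best := by
  induction t generalizing a best with
  | nil => simp [pvAdjDiffs]
  | cons b t ih =>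
    rw [List.foldl_cons, pvAdjDiffs]
    by_cases h : a.2 = b.2
    · simp only [h, ne_eq, not_true_eq_false, if_false, List.nil_append]
      simpa [h] using ih b best
    · have hne : a.2 ≠ b.2 := h
      simp only [if_pos hne, ne_eq, List.cons_append, List.nil_append, List.foldl_cons]
      have hmin : min best (b.1 - a.1) = if b.1 - a.1 < best then b.1 - a.1 else best := by
        rw [min_def]; split_ifs <;> omega
      rw [← hmin]
      simpa [hne, hmin] using ih b (min best (b.1 - a.1))

theorem pvAdjDiffs_cons (a : Int × Int) (t : List (Int × Int)) {d : Int}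
    (h : d ∈ pvAdjDiffs t) : d ∈ pvAdjDiffs (a :: t) := by
  match t with
  | [] => simp [pvAdjDiffs] at h
  | b :: t' => rw [pvAdjDiffs]; exact List.mem_append_right _ h

theorem pvMem_adjDiffs {c : List (Int × Int)} {d : Int}
    (hs : c.Pairwise (fun u v => u.1 ≤ v.1)) (h : d ∈ pvAdjDiffs c) :
    ∃ a b, a ∈ c ∧ b ∈ c ∧ a.2 ≠ b.2 ∧ a.1 ≤ b.1 ∧ d = b.1 - a.1 := by
  induction c with
  | nil => simp [pvAdjDiffs] at h
  | cons a t ih =>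
    match t, h with
    | [], h => simp [pvAdjDiffs] at h
    | b :: t', h =>
      rw [pvAdjDiffs, List.mem_append] at h
      rcases h with h | h
      · by_cases htag : a.2 = b.2
        · simp [htag] at h
        · simp [htag] at h
          exact ⟨a, b, by simp, by simp, htag, (List.pairwise_cons.1 hs).1 b (by simp), h⟩
      · obtain ⟨u, v, hu, hv, htag, hle, hd⟩ := ih (List.pairwise_cons.1 hs).2 h
        exact ⟨u, v, List.mem_cons_of_mem _ hu, List.mem_cons_of_mem _ hv, htag, hle, hd⟩

theorem pvAdjLe_head (t : List (Int × Int)) (u v : Int × Int)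
    (hs : (u :: t).Pairwise (fun p q => p.1 ≤ q.1)) (hv : v ∈ t) (htag : v.2 ≠ u.2) :
    ∃ d ∈ pvAdjDiffs (u :: t), d ≤ v.1 - u.1 := by
  induction t generalizing u with
  | nil => simp at hv
  | cons b t' ih =>
    have hub : u.1 ≤ b.1 := (List.pairwise_cons.1 hs).1 b (by simp)
    have hs' : (b :: t').Pairwise (fun p q => p.1 ≤ q.1) := (List.pairwise_cons.1 hs).2
    by_cases h : b.2 = u.2
    · have hvb : v ≠ b := by intro e; rw [e] at htag; exact htag h
      have hv' : v ∈ t' := by rcases List.mem_cons.1 hv with e | hv2; exacts [absurd e hvb, hv2]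
      obtain ⟨d, hd, hle⟩ := ih b hs' hv' (by rw [h]; exact htag)
      exact ⟨d, pvAdjDiffs_cons u _ hd, by omega⟩
    · refine ⟨b.1 - u.1, ?_, ?_⟩
      · rw [pvAdjDiffs]
        exact List.mem_append_left _ (by simp; exact Ne.symm h)
      · have hbv : b.1 ≤ v.1 := by
          rcases List.mem_cons.1 hv with e | hv'
          · simp [e]
          · exact (List.pairwise_cons.1 hs').1 v hv'
        omega

theorem pvAdjLe {c : List (Int × Int)} (u v : Int × Int)
    (hs : c.Pairwise (fun p q => p.1 ≤ q.1)) (hu : u ∈ c) (hv : v ∈ c) (htag : u.2 ≠ v.2) :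
    ∃ d ∈ pvAdjDiffs c, d ≤ |v.1 - u.1| := by
  induction c with
  | nil => simp at hu
  | cons a t ih =>
    rcases List.mem_cons.1 hu with rfl | hu
    · rcases List.mem_cons.1 hv with rfl | hv
      · exact absurd rfl htag
      · obtain ⟨d, hd, hle⟩ := pvAdjLe_head t u v hs hv (Ne.symm htag)
        have : u.1 ≤ v.1 := (List.pairwise_cons.1 hs).1 v hv
        exact ⟨d, hd, by rw [abs_of_nonneg (by omega)]; omega⟩
    · rcases List.mem_cons.1 hv with rfl | hv
      · have hu' : u ∈ t := by rcases List.mem_cons.1 hu with e | hu2; exacts [absurd (congrArg Prod.snd e) htag, hu2]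
        obtain ⟨d, hd, hle⟩ := pvAdjLe_head t v u hs hu' htag
        have : v.1 ≤ u.1 := (List.pairwise_cons.1 hs).1 u hu'
        exact ⟨d, hd, by rw [abs_of_nonpos (by omega)]; omega⟩
      · obtain ⟨d, hd, hle⟩ := ih (List.pairwise_cons.1 hs).2 hu hv
        exact ⟨d, pvAdjDiffs_cons a _ hd, hle⟩

theorem pvFoldNested (l1 l2 : List Int) (g : Int → Int → Int) (init : Int) :
    l1.foldl (fun a x => l2.foldl (fun a y => min a (g x y)) a) init
      = (l1.flatMap (fun x => l2.map (g x))).foldl min init := by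
  induction l1 generalizing init with
  | nil => simp
  | cons x l1 ih =>
    simp only [List.flatMap_cons, List.foldl_append, List.foldl_map, List.foldl_cons]
    exact ih _

theorem pvMinDist_nonempty (t1 t2 : String) (d : PySem.Dict String (List Int))
    (h1 : d.getD t1 [] ≠ []) (h2 : d.getD t2 [] ≠ []) :
    pvMinDist t1 t2 d = (pvCross (d.getD t1 []) (d.getD t2 [])).foldl min 150000 := by
  unfold pvMinDist
  rw [if_neg (by simp [h1]), if_neg (by simp [h2])]
  simp only [PySem.List.len_eq]
  rw [PySem.List.foldl_pyRange_zero_pyGetD' (d.getD t1 []) 0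
    (fun mv x => (PySem.List.pyRange 0 ((d.getD t2 []).length : Int) 1).foldl
      (fun mv j => if |PySem.List.pyGetD (d.getD t2 []) j 0 - x| < mv
        then |PySem.List.pyGetD (d.getD t2 []) j 0 - x| else mv) mv) 150000]
  have hinner : ∀ (x mv : Int),
      (PySem.List.pyRange 0 ((d.getD t2 []).length : Int) 1).foldl
        (fun mv j => if |PySem.List.pyGetD (d.getD t2 []) j 0 - x| < mv
          then |PySem.List.pyGetD (d.getD t2 []) j 0 - x| else mv) mv
      = (d.getD t2 []).foldl (fun a y => min a |y - x|) mv := by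
    intro x mv
    rw [PySem.List.foldl_pyRange_zero_pyGetD' (d.getD t2 []) 0
      (fun a y => if |y - x| < a then |y - x| else a) mv]
    apply PySem.List.foldl_congr_mem
    intro a y _
    rw [min_def]; split_ifs <;> omega
  calc (d.getD t1 []).foldl _ 150000
      = (d.getD t1 []).foldl (fun mv x => (d.getD t2 []).foldl (fun a y => min a |y - x|) mv) 150000 := by
        apply PySem.List.foldl_congr_mem
        intro a x _
        exact hinner x a
    _ = (pvCross (d.getD t1 []) (d.getD t2 [])).foldl min 150000 :=
        pvFoldNested _ _ (fun x y => |y - x|) 150000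

theorem pvMem_cross {l1 l2 : List Int} {z : Int} :
    z ∈ pvCross l1 l2 ↔ ∃ x ∈ l1, ∃ y ∈ l2, z = |y - x| := by
  simp [pvCross, eq_comm]

theorem pvPairMin_eq_cross (l1 l2 : List Int) (h1 : l1 ≠ []) (h2 : l2 ≠ []) :
    (pvCross l1 l2).foldl min 150000 = pvPairMin l1 l2 := by
  unfold pvPairMin
  rw [if_neg (by simp [h1, h2])]
  set c := PySem.List.sorted
      (l1.map (fun p => (p, (0 : Int))) ++ l2.map (fun p => (p, (1 : Int)))) (fun pt => pt.1) false
    with hc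
  have hperm : c.Perm (l1.map (fun p => (p, (0 : Int))) ++ l2.map (fun p => (p, (1 : Int)))) :=
    PySem.List.sorted_perm _ _ _
  have hpw : c.Pairwise (fun u v => u.1 ≤ v.1) := PySem.List.sorted_pairwise _ _
  have hmemc : ∀ p ∈ c, (p.2 = 0 ∧ p.1 ∈ l1) ∨ (p.2 = 1 ∧ p.1 ∈ l2) := by
    intro p hp
    have := hperm.mem_iff.1 hp
    rcases List.mem_append.1 this with h | h
    · obtain ⟨x, hx, rfl⟩ := List.mem_map.1 h
      exact Or.inl ⟨rfl, hx⟩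
    · obtain ⟨y, hy, rfl⟩ := List.mem_map.1 h
      exact Or.inr ⟨rfl, hy⟩
  have hin1 : ∀ x ∈ l1, ((x, (0 : Int)) : Int × Int) ∈ c := fun x hx =>
    hperm.mem_iff.2 (List.mem_append_left _ (List.mem_map.2 ⟨x, hx, rfl⟩))
  have hin2 : ∀ y ∈ l2, ((y, (1 : Int)) : Int × Int) ∈ c := fun y hy =>
    hperm.mem_iff.2 (List.mem_append_right _ (List.mem_map.2 ⟨y, hy, rfl⟩))
  have hcne : c ≠ [] := by
    intro e
    rw [hc, PySem.List.sorted_eq_nil_iff] at e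
    exact h1 (by simpa using (List.append_eq_nil_iff.1 e).1)
  obtain ⟨hd, tl, he⟩ : ∃ hd tl, c = hd :: tl := by
    cases hx : c with
    | nil => exact absurd hx hcne
    | cons a b => exact ⟨a, b, rfl⟩
  have hB : (c.foldl (fun (st : Int × Option (Int × Int)) pt =>
        match st.2 with
        | none => (st.1, some pt)
        | some prev =>
          if prev.2 ≠ pt.2 then
            (if pt.1 - prev.1 < st.1 then pt.1 - prev.1 else st.1, some pt)
          else (st.1, some pt)) ((150000 : Int), (none : Option (Int × Int)))).1
      = (pvAdjDiffs c).foldl min 150000 := by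
    rw [he, List.foldl_cons]
    exact pvScan_eq tl hd 150000
  rw [hB]
  apply le_antisymm
  · rcases PySem.List.foldl_min_mem (pvAdjDiffs c) 150000 with he' | he'
    · rw [he']; exact (PySem.List.foldl_min_le _ _).1
    · obtain ⟨a, b, ha, hb, htag, hle, hd2⟩ := pvMem_adjDiffs hpw he'
      have hz : (pvAdjDiffs c).foldl min 150000 ∈ pvCross l1 l2 := by
        rcases hmemc a ha with ⟨ta, ha1⟩ | ⟨ta, ha2⟩ <;> rcases hmemc b hb with ⟨tb, hb1⟩ | ⟨tb, hb2⟩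
        · exact absurd (ta.trans tb.symm) htag
        · exact pvMem_cross.2 ⟨a.1, ha1, b.1, hb2, by rw [hd2, abs_of_nonneg (by omega)]⟩
        · exact pvMem_cross.2 ⟨b.1, hb1, a.1, ha2, by rw [hd2, abs_of_nonpos (by omega)]; omega⟩
        · exact absurd (ta.trans tb.symm) htag
      exact (PySem.List.foldl_min_le _ _).2 _ hz
  · rcases PySem.List.foldl_min_mem (pvCross l1 l2) 150000 with he' | he'
    · rw [he']; exact (PySem.List.foldl_min_le _ _).1
    · obtain ⟨x, hx, y, hy, hz⟩ := pvMem_cross.1 he'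
      obtain ⟨d2, hd2, hle⟩ := pvAdjLe (x, (0:Int)) (y, (1:Int)) hpw (hin1 x hx) (hin2 y hy) (by simp)
      calc (pvAdjDiffs c).foldl min 150000 ≤ d2 := (PySem.List.foldl_min_le _ _).2 _ hd2
        _ ≤ |y - x| := hle
        _ = (pvCross l1 l2).foldl min 150000 := hz.symm

theorem pvMinDist_eq_pairMin (t1 t2 : String) (d : PySem.Dict String (List Int)) :
    pvMinDist t1 t2 d = pvPairMin (d.getD t1 []) (d.getD t2 []) := by
  by_cases h1 : d.getD t1 [] = []
  · unfold pvMinDist pvPairMin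
    simp [h1]
  · by_cases h2 : d.getD t2 [] = []
    · unfold pvMinDist pvPairMin
      simp [h2]
    · rw [pvMinDist_nonempty t1 t2 d h1 h2, pvPairMin_eq_cross _ _ h1 h2]

theorem pvDedup_eq (l : List String) : ∀ acc : List String,
    (l.foldl (fun (st : List String × PySem.Set String) q =>
        if PySem.Set.contains st.2 q then st else (st.1 ++ [q], PySem.Set.add st.2 q))
      (acc, acc)).1
    = l.foldl (fun result q => if result.contains q then result else result ++ [q]) acc := by
  induction l with
  | nil => intro acc; rfl
  | cons q l ih =>
    intro acc
    simp only [List.foldl_cons]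
    by_cases hc : PySem.Set.contains acc q
    · have hc' : acc.contains q = true := by simpa [PySem.Set.contains] using hc
      rw [if_pos hc, if_pos hc']
      exact ih acc
    · have hc' : ¬ acc.contains q = true := by simpa [PySem.Set.contains] using hc
      rw [if_neg hc, if_neg hc']
      have hmem : q ∉ acc := by simpa using hc'
      have hadd : PySem.Set.add acc q = acc ++ [q] := by
        simp [PySem.Set.add, hmem]
      rw [hadd]
      exact ih (acc ++ [q])

theorem pvInnerFold (i : Int) (hi : 0 ≤ i) (g : Int → Int) :
    ∀ (js : List Int) (m : List (List Int)),
      js.foldl (fun m j => if i ≠ j then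
          PySem.List.pySetD m i (PySem.List.pySetD (PySem.List.pyGetD m i []) j (g j)) else m) m
      = PySem.List.pySetD m i
          (js.foldl (fun row j => if i ≠ j then PySem.List.pySetD row j (g j) else row)
            (PySem.List.pyGetD m i [])) := by
  have hout : ∀ (m : List (List Int)), ¬ i < (m.length : Int) →
      ∀ (v : List Int), PySem.List.pySetD m i v = m := by
    intro m hl v
    simp only [PySem.List.pySetD]
    rw [(PySem.List.pySet?_eq_none_iff _ _ _).2 (by
      intro hr
      rcases hr with ⟨h1, h2⟩
      omega)]
    rfl
  intro js
  induction js with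
  | nil =>
    intro m
    by_cases hl : i < (m.length : Int)
    · simp only [List.foldl_nil]
      rw [PySem.List.pySetD_of_nonneg _ _ hi,
        PySem.List.pyGetD_eq_getElem _ _ hi (by omega)]
      exact (List.set_getElem_self (by omega)).symm
    · simp only [List.foldl_nil]
      exact (hout m hl _).symm
  | cons j js ih =>
    intro m
    by_cases hij : i = j
    · simp only [List.foldl_cons, if_neg (by omega : ¬ i ≠ j)]
      exact ih m
    · simp only [List.foldl_cons, if_pos (by omega : i ≠ j)]
      by_cases hl : i < (m.length : Int)
      · rw [ih]
        have hset : ∀ (mm : List (List Int)) (v : List Int),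
            PySem.List.pySetD mm i v = mm.set i.toNat v := fun mm v =>
          PySem.List.pySetD_of_nonneg _ _ hi
        rw [hset, hset, hset]
        have hlen : i.toNat < m.length := by omega
        have hget : PySem.List.pyGetD (m.set i.toNat (PySem.List.pySetD (PySem.List.pyGetD m i []) j (g j))) i []
            = PySem.List.pySetD (PySem.List.pyGetD m i []) j (g j) := by
          rw [PySem.List.pyGetD_eq_getElem _ _ hi (by simp; omega)]
          simp
        rw [hget, List.set_set]
      · rw [hout m hl, ih m, hout m hl, hout m hl]

theorem pvSetLoop {γ : Type} (F : Int → γ → γ) (dflt : γ) (b : Int) :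
    ∀ (n : Nat) (a : Int) (m0 : List γ), (b - a).toNat = n → 0 ≤ a → (m0.length : Int) = b →
      (PySem.List.pyRange a b 1).foldl
          (fun m i => PySem.List.pySetD m i (F i (PySem.List.pyGetD m i dflt))) m0
        = m0.take a.toNat ++ (PySem.List.pyRange a b 1).map (fun i => F i (PySem.List.pyGetD m0 i dflt)) := by
  intro n
  induction n with
  | zero =>
    intro a m0 hn ha hb
    have hba : b ≤ a := by omega
    rw [PySem.List.pyRange_one_eq_nil hba]
    simp [List.take_of_length_le (by omega : m0.length ≤ a.toNat)]
  | succ k ih =>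
    intro a m0 hn ha hb
    have hab : a < b := by omega
    rw [PySem.List.pyRange_one_cons hab]
    simp only [List.foldl_cons, List.map_cons]
    have hat : a.toNat < m0.length := by omega
    set v := F a (PySem.List.pyGetD m0 a dflt) with hv
    have hstep : PySem.List.pySetD m0 a v = m0.set a.toNat v :=
      PySem.List.pySetD_of_nonneg _ _ ha
    rw [hstep]
    rw [ih (a + 1) (m0.set a.toNat v) (by omega) (by omega) (by simp; omega)]
    have htake : (m0.set a.toNat v).take (a + 1).toNat = m0.take a.toNat ++ [v] := by
      have h1 : (a + 1).toNat = a.toNat + 1 := by omega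
      rw [h1, List.take_add_one, List.take_set, List.getElem?_set_self hat]
      have : (m0.take a.toNat).set a.toNat v = m0.take a.toNat := by
        exact List.set_eq_of_length_le (by simp)
      rw [this]
      rfl
    have hmap : (PySem.List.pyRange (a + 1) b 1).map
          (fun i => F i (PySem.List.pyGetD (m0.set a.toNat v) i dflt))
        = (PySem.List.pyRange (a + 1) b 1).map (fun i => F i (PySem.List.pyGetD m0 i dflt)) := by
      apply List.map_congr_left
      intro i hi
      have hi' := PySem.List.mem_pyRange_one.1 hi
      have hgi : PySem.List.pyGetD (m0.set a.toNat v) i dflt = PySem.List.pyGetD m0 i dflt := by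
        rw [PySem.List.pyGetD_eq_getElem _ _ (by omega) (by simp; omega),
            PySem.List.pyGetD_eq_getElem _ _ (by omega) (by omega)]
        exact List.getElem_set_ne (by omega) _
      rw [hgi]
    rw [htake, hmap, List.append_assoc, List.singleton_append]

theorem pvSetD_out {γ : Type} (xs : List γ) (i : Int) (v : γ) (h : ¬ i < (xs.length : Int)) :
    PySem.List.pySetD xs i v = xs := by
  simp only [PySem.List.pySetD]
  rw [(PySem.List.pySet?_eq_none_iff _ _ _).2 (by intro hr; rcases hr with ⟨h1, h2⟩; omega)]
  rfl

theorem pvTerms_eq (query : List String) :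
    (query.foldl (fun (st : List String × PySem.Set String) q =>
        if PySem.Set.contains st.2 q then st else (st.1 ++ [q], PySem.Set.add st.2 q))
      ([], PySem.Set.empty)).1 = pvRemoveDuplicates query :=
  pvDedup_eq query []

theorem matrixDist_eq_alt (query : List String) (invertedFile : List (String × List Int)) :
    matrixDist query invertedFile = matrixDist_alt query invertedFile := by
  unfold matrixDist matrixDist_alt
  dsimp only
  rw [pvTerms_eq query]
  simp only [PySem.List.len_eq]
  set q' := pvRemoveDuplicates query with hq'
  set D := PySem.Dict.mk invertedFile with hD
  set N : Int := (q'.length : Int) with hN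
  set g : Int → Int → Int := fun i j =>
    pvMinDist (PySem.List.pyGetD q' i "") (PySem.List.pyGetD q' j "") D with hg
  set zrow : List Int := (PySem.List.pyRange 0 N 1).map (fun _ => (0 : Int)) with hzrow
  set m0 : List (List Int) := (PySem.List.pyRange 0 N 1).map (fun _ => zrow) with hm0
  have hzlen : (zrow.length : Int) = N := by
    rw [hzrow]; simp [PySem.List.length_pyRange_one]; omega
  have hm0len : (m0.length : Int) = N := by
    rw [hm0]; simp [PySem.List.length_pyRange_one]; omega
  -- rewrite the outer loop body using the inner-loop lemma
  rw [PySem.List.foldl_congr_mem (PySem.List.pyRange 0 N 1) _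
    (fun m i => PySem.List.pySetD m i
      ((PySem.List.pyRange 0 N 1).foldl
        (fun row j => if i ≠ j then PySem.List.pySetD row j (g i j) else row)
        (PySem.List.pyGetD m i []))) m0
    (fun m i hi => pvInnerFold i (PySem.List.mem_pyRange_one.1 hi).1 (g i) _ m)]
  -- collapse the outer imperative loop
  rw [pvSetLoop (fun i r =>
      (PySem.List.pyRange 0 N 1).foldl
        (fun row j => if i ≠ j then PySem.List.pySetD row j (g i j) else row) r)
    [] N N.toNat 0 m0 (by omega) le_rfl hm0len]
  simp only [Int.toNat_zero, List.take_zero, List.nil_append]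
  apply List.map_congr_left
  intro i hi
  have hi' := PySem.List.mem_pyRange_one.1 hi
  rw [PySem.List.pyGetD_map_pyRange_of_nonneg _ N i [] hi'.1 hi'.2]
  -- rewrite the row loop into single-write form
  rw [PySem.List.foldl_congr_mem (PySem.List.pyRange 0 N 1) _
    (fun row j => PySem.List.pySetD row j
      ((fun j old => if i ≠ j then g i j else old) j (PySem.List.pyGetD row j 0))) zrow
    (by
      intro row j hj
      have hj' := PySem.List.mem_pyRange_one.1 hj
      by_cases hij : i = j
      · simp only [hij, ne_eq, not_true_eq_false, if_false]
        by_cases hjl : j < (row.length : Int)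
        · rw [PySem.List.pySetD_of_nonneg _ _ hj'.1,
            PySem.List.pyGetD_eq_getElem _ _ hj'.1 hjl]
          exact (List.set_getElem_self (by omega)).symm
        · exact (pvSetD_out _ _ _ hjl).symm
      · simp only [if_pos (by omega : i ≠ j)])]
  rw [pvSetLoop (fun j old => if i ≠ j then g i j else old) 0 N N.toNat 0 zrow
    (by omega) le_rfl hzlen]
  simp only [Int.toNat_zero, List.take_zero, List.nil_append]
  apply List.map_congr_left
  intro j hj
  have hj' := PySem.List.mem_pyRange_one.1 hj
  rw [PySem.List.pyGetD_map_pyRange_of_nonneg _ N j 0 hj'.1 hj'.2]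
  by_cases hij : i = j
  · simp [hij]
  · simp only [if_pos (by omega : i ≠ j)]
    have hpl : ∀ (k : Int), 0 ≤ k → k < N →
        PySem.List.pyGetD (q'.map (fun t => D.getD t [])) k []
          = D.getD (PySem.List.pyGetD q' k "") [] := by
      intro k h0 h1
      rw [PySem.List.pyGetD_eq_getElem _ _ h0 (by simp; omega),
        PySem.List.pyGetD_eq_getElem _ _ h0 (by omega)]
      simp
    rw [hpl i hi'.1 hi'.2, hpl j hj'.1 hj'.2, hg]
    exact pvMinDist_eq_pairMin _ _ _

-- ===== VERDICT (by name: the statement is the Claim_ definition above) =====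
theorem matrixDist_spec : Claim_equal_matrixDist := by
  intro query invertedFile _
  exact matrixDist_eq_alt query invertedFile
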